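-- pv_equiv track=rewrite | github.com/aash/factorio-assistant | common.py | get_source_sink
-- ===== SOURCE A (Python) =====
-- directions = {
--     'r': (0, 1),
--     'l': (0, -1),
--     'u': (-1, 0),
--     'd': (1, 0)
-- }
--
-- reverse_directions = {
--     'r': (0, -1),
--     'l': (0, 1),
--     'u': (1, 0),
--     'd': (-1, 0)
-- }
--
-- def is_belt(grid, row, col):
--     return 0 <= row < len(grid) and 0 <= col < len(grid[row]) and grid[row][col] in directions
--
-- def find_sink(grid, row, col):
--     while is_belt(grid, row, col):
--         direction = grid[row][col]
--         dr, dc = directions[direction]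
--         new_row, new_col = row + dr, col + dc
--         if not is_belt(grid, new_row, new_col):
--             break
--         row, col = new_row, new_col
--     return row, col
--
-- def get_source_sink(grid):
--     sources = []
--
--     # Traverse the grid to find all sources
--     for row in range(len(grid)):
--         for col in range(len(grid[row])):
--             if grid[row][col] in directions:
--                 has_incoming = False
--
--                 # Check for incoming belts
--                 for dir_key, (dr, dc) in reverse_directions.items():
--                     incoming_row, incoming_col = row + dr, col + dc
--                     if is_belt(grid, incoming_row, incoming_col) and grid[incoming_row][incoming_col] in directions:
--                         direction_into_current = grid[incoming_row][incoming_col]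
--                         if directions[direction_into_current] == (-dr, -dc):
--                             has_incoming = True
--                             break
--
--                 if not has_incoming:
--                     sources.append((row, col))
--
--     source_sink_pairs = []
--
--     # Find all (source, sink) pairs
--     for source in sources:
--         sink = find_sink(grid, *source)
--         source_sink_pairs.append((source, sink))
--
--     return source_sink_pairs
-- ===== SOURCE B (Python) =====
-- directions = {
--     'r': (0, 1),
--     'l': (0, -1),
--     'u': (-1, 0),
--     'd': (1, 0)
-- }
--
-- def get_source_sink(grid):
--     # One pass marks every cell that has an incoming belt; sinks are then
--     # found by following the belt with memoization + path compression (O(N)).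
--     def belt(r, c):
--         return 0 <= r < len(grid) and 0 <= c < len(grid[r]) and grid[r][c] in directions
--
--     has_in = set()
--     for r in range(len(grid)):
--         for c in range(len(grid[r])):
--             if grid[r][c] in directions:
--                 dr, dc = directions[grid[r][c]]
--                 if belt(r + dr, c + dc):
--                     has_in.add((r + dr, c + dc))
--
--     memo = {}
--
--     def sink(r, c):
--         stack = []
--         while (r, c) not in memo:
--             dr, dc = directions[grid[r][c]]
--             if not belt(r + dr, c + dc):
--                 memo[(r, c)] = (r, c)
--                 break
--             stack.append((r, c))
--             r, c = r + dr, c + dc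
--         s = memo[(r, c)]
--         for p in stack:
--             memo[p] = s
--         return s
--
--     pairs = []
--     for r in range(len(grid)):
--         for c in range(len(grid[r])):
--             if grid[r][c] in directions and (r, c) not in has_in:
--                 pairs.append(((r, c), sink(r, c)))
--     return pairs
-- ===== Notes on version B (the rewrite author's own statement) =====
-- stated objective: alternative
-- what changed: A rescans the four neighbours of every cell to find sources and re-walks the whole belt path from every source; B makes one forward pass that marks every cell with an incoming belt, then finds each sink by a single walk with memoization and path compression so shared path suffixes are not re-walked.
import Mathlib
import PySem

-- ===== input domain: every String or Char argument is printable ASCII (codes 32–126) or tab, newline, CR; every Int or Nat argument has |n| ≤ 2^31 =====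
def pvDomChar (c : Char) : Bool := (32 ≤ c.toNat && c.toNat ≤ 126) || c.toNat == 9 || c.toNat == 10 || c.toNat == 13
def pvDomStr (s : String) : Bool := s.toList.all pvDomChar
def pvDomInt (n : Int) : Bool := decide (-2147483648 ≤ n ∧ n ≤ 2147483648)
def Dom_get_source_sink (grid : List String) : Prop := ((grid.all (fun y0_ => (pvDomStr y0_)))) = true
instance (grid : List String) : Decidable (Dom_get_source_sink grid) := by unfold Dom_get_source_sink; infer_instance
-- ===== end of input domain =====

-- B replaces A's per-source belt walks and per-cell reverse-neighbour scans by one forward pass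
-- marking cells with incoming belts plus a memoized walk with path compression (objective: alternative).

-- ===== PORT A =====
-- shared helpers: directions table, grid cell access, is_belt (both Pythons contain the identical code)
def dirOf (ch : Char) : Option (Int × Int) :=
  if ch = 'r' then some (0, 1)
  else if ch = 'l' then some (0, -1)
  else if ch = 'u' then some (-1, 0)
  else if ch = 'd' then some (1, 0)
  else none

def dirD (ch : Char) : Int × Int := (dirOf ch).getD (0, 0)

def rowLen (grid : List String) (rn : Nat) : Nat := (grid.getD rn "").toList.length

-- grid[row][col]; both Pythons only evaluate it on in-bounds indices (guarded by is_belt /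
-- the loop ranges), where the getD defaults are never used, so this total form is exact there.
def charAt (grid : List String) (row col : Int) : Char :=
  ((grid.getD row.toNat "").toList).getD col.toNat ' '

def is_belt (grid : List String) (row col : Int) : Bool :=
  decide (0 ≤ row) && decide (row < (grid.length : Int)) &&
  decide (0 ≤ col) && decide (col < ((rowLen grid row.toNat : Nat) : Int)) &&
  (dirOf (charAt grid row col)).isSome

-- (row + dr, col + dc) for (dr, dc) = directions[grid[row][col]]
def mv (grid : List String) (p : Int × Int) : Int × Int :=
  (p.1 + (dirD (charAt grid p.1 p.2)).1, p.2 + (dirD (charAt grid p.1 p.2)).2)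

def revDirsList : List (Char × (Int × Int)) :=
  [('r', (0, -1)), ('l', (0, 1)), ('u', (1, 0)), ('d', (-1, 0))]

-- the 'check for incoming belts' loop of A (break on first hit = List.any)
def hasIncoming (grid : List String) (row col : Int) : Bool :=
  revDirsList.any (fun kv =>
    let ir := row + kv.2.1
    let ic := col + kv.2.2
    is_belt grid ir ic && (dirOf (charAt grid ir ic)).isSome &&
      decide (dirD (charAt grid ir ic) = (-kv.2.1, -kv.2.2)))

def cellCount (grid : List String) : Nat := (grid.map (fun s => s.toList.length)).sum

-- A's find_sink while-loop; fuel cellCount+1 suffices on every input where the Python loop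
-- terminates (a terminating walk never revisits a cell)
def findSinkA (grid : List String) : Nat → Int → Int → Int × Int
  | 0, row, col => (row, col)
  | fuel + 1, row, col =>
    if is_belt grid row col then
      let d := dirD (charAt grid row col)
      let nr := row + d.1
      let nc := col + d.2
      if is_belt grid nr nc then findSinkA grid fuel nr nc else (row, col)
    else (row, col)

def get_source_sink (grid : List String) : List ((Int × Int) × (Int × Int)) :=
  let sources : List (Int × Int) :=
    (List.range grid.length).foldl (fun acc rn =>
      (List.range (rowLen grid rn)).foldl (fun acc cn =>
        let p : Int × Int := ((rn : Int), (cn : Int))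
        if (dirOf (charAt grid p.1 p.2)).isSome then
          if hasIncoming grid p.1 p.2 then acc else acc ++ [p]
        else acc) acc) []
  sources.foldl (fun acc s => acc ++ [(s, findSinkA grid (cellCount grid + 1) s.1 s.2)]) []

-- ===== PORT B =====
-- the has_in set: one forward pass, every belt cell marks its belt successor
def hasInSet (grid : List String) : PySem.Set (Int × Int) :=
  (List.range grid.length).foldl (fun st rn =>
    (List.range (rowLen grid rn)).foldl (fun st cn =>
      let p : Int × Int := ((rn : Int), (cn : Int))
      if (dirOf (charAt grid p.1 p.2)).isSome then
        let q := mv grid p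
        if is_belt grid q.1 q.2 then PySem.Set.add st q else st
      else st) st) PySem.Set.empty

-- Source B's 'while (r, c) not in memo' loop; returns (stop cell, stack, memo); same fuel bound as A's walk
def sinkLoop (grid : List String) :
    Nat → (Int × Int) → List (Int × Int) → PySem.Dict (Int × Int) (Int × Int) →
    (Int × Int) × List (Int × Int) × PySem.Dict (Int × Int) (Int × Int)
  | 0, p, st, memo => (p, st, memo)
  | fuel + 1, p, st, memo =>
    if (memo.get? p).isSome then (p, st, memo)
    else
      let q := mv grid p
      if is_belt grid q.1 q.2 then sinkLoop grid fuel q (st ++ [p]) memo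
      else (p, st, memo.insert p p)

-- Source B's sink(r, c): run the loop, read the memo at the stop cell, compress the path
def sinkB (grid : List String) (p : Int × Int) (memo : PySem.Dict (Int × Int) (Int × Int)) :
    (Int × Int) × PySem.Dict (Int × Int) (Int × Int) :=
  let r := sinkLoop grid (cellCount grid + 1) p [] memo
  let s := r.2.2.getD r.1 (0, 0)
  (s, r.2.1.foldl (fun m q => m.insert q s) r.2.2)

def get_source_sink_alt (grid : List String) : List ((Int × Int) × (Int × Int)) :=
  let hin := hasInSet grid
  ((List.range grid.length).foldl (fun st rn =>
    (List.range (rowLen grid rn)).foldl (fun st cn =>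
      let p : Int × Int := ((rn : Int), (cn : Int))
      if (dirOf (charAt grid p.1 p.2)).isSome && !(PySem.Set.contains hin p) then
        let r := sinkB grid p st.2
        (st.1 ++ [(p, r.1)], r.2)
      else st) st)
    (([] : List ((Int × Int) × (Int × Int))), (PySem.Dict.empty : PySem.Dict (Int × Int) (Int × Int)))).1

-- ===== PRECONDITION & SPEC =====
-- one step of A's find_sink walk (identity where the walk stops)
def stepF (grid : List String) (p : Int × Int) : Int × Int :=
  if is_belt grid p.1 p.2 && is_belt grid (mv grid p).1 (mv grid p).2 then mv grid p else p

-- all grid positions, row-major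
def cells (grid : List String) : List (Int × Int) :=
  (List.range grid.length).flatMap (fun rn =>
    (List.range (rowLen grid rn)).map (fun cn => ((rn : Int), (cn : Int))))

-- Pre_ excludes exactly the grids on which some source cell's belt path runs into a belt cycle:
-- there A's find_sink while-loop (and B's walk) never terminates, so A returns nothing.
def Pre_get_source_sink (grid : List String) : Prop :=
  ∀ p ∈ cells grid, is_belt grid p.1 p.2 = true → hasIncoming grid p.1 p.2 = false →
    stepF grid ((stepF grid)^[cellCount grid] p) = (stepF grid)^[cellCount grid] p

instance (grid : List String) : Decidable (Pre_get_source_sink grid) := by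
  unfold Pre_get_source_sink; infer_instance

def pvWitness_get_source_sink : List String := ["rr.", "d u"]

def Spec_get_source_sink (grid : List String) (out : List ((Int × Int) × (Int × Int))) : Prop := out = get_source_sink_alt grid
instance (grid : List String) (out : List ((Int × Int) × (Int × Int))) : Decidable (Spec_get_source_sink grid out) := by unfold Spec_get_source_sink; infer_instance

-- ===== CLAIM (what is proved, stated in full; the proofs are below) =====
def Claim_equal_get_source_sink : Prop := ∀ (grid : List String), Dom_get_source_sink grid → Pre_get_source_sink grid → Spec_get_source_sink grid (get_source_sink grid)

-- ===== LEMMAS AND PROOFS =====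

-- the sink a terminating walk reaches (spec value shared by both correctness arguments)
def sinkOf (grid : List String) (p : Int × Int) : Int × Int := (stepF grid)^[cellCount grid] p

def Stuck (grid : List String) (p : Int × Int) : Prop := stepF grid (sinkOf grid p) = sinkOf grid p

def MemoOK (grid : List String) (memo : PySem.Dict (Int × Int) (Int × Int)) : Prop :=
  ∀ k v, memo.get? k = some v → Stuck grid k ∧ v = sinkOf grid k


lemma dirD_cases (ch : Char) (h : (dirOf ch).isSome = true) :
    dirD ch = (0, 1) ∨ dirD ch = (0, -1) ∨ dirD ch = (-1, 0) ∨ dirD ch = (1, 0) := by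
  unfold dirOf at h
  unfold dirD dirOf
  split_ifs at h ⊢ <;> simp_all

lemma belt_isSome (grid : List String) (row col : Int) (h : is_belt grid row col = true) :
    (dirOf (charAt grid row col)).isSome = true := by
  simp only [is_belt, Bool.and_eq_true] at h
  exact h.2

lemma mv_ne (grid : List String) (p : Int × Int) (h : is_belt grid p.1 p.2 = true) :
    mv grid p ≠ p := by
  rcases dirD_cases _ (belt_isSome grid p.1 p.2 h) with h' | h' | h' | h' <;>
    simp [mv, h', Prod.ext_iff]

lemma stepF_eq_mv (grid : List String) (p : Int × Int)
    (h1 : is_belt grid p.1 p.2 = true) (h2 : is_belt grid (mv grid p).1 (mv grid p).2 = true) :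
    stepF grid p = mv grid p := by
  simp [stepF, h1, h2]

lemma stepF_eq_self (grid : List String) (p : Int × Int)
    (h : ¬ (is_belt grid p.1 p.2 = true ∧ is_belt grid (mv grid p).1 (mv grid p).2 = true)) :
    stepF grid p = p := by
  unfold stepF
  rw [if_neg]
  simpa [Bool.and_eq_true] using h

lemma findSinkA_stuck (grid : List String) (p : Int × Int) (h : stepF grid p = p) :
    ∀ fuel, findSinkA grid fuel p.1 p.2 = p := by
  intro fuel
  cases fuel with
  | zero => simp [findSinkA]
  | succ f =>
    by_cases hb : is_belt grid p.1 p.2 = true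
    · by_cases hb2 : is_belt grid (mv grid p).1 (mv grid p).2 = true
      · exact absurd (h ▸ stepF_eq_mv grid p hb hb2).symm (mv_ne grid p hb)
      · simp only [findSinkA, hb, if_true]
        rw [if_neg (by simpa [mv] using hb2)]
    · simp [findSinkA, hb]

lemma iter_fix_ge {α : Type} (f : α → α) (p : α) (n m : Nat)
    (h : f (f^[n] p) = f^[n] p) (hnm : n ≤ m) : f^[m] p = f^[n] p := by
  obtain ⟨k, rfl⟩ := Nat.exists_eq_add_of_le hnm
  rw [Nat.add_comm, Function.iterate_add_apply, Function.iterate_fixed h]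

lemma findSinkA_eq (grid : List String) :
    ∀ (n : Nat) (fuel : Nat) (p : Int × Int), n ≤ fuel →
      stepF grid ((stepF grid)^[n] p) = (stepF grid)^[n] p →
      findSinkA grid fuel p.1 p.2 = (stepF grid)^[n] p := by
  intro n
  induction n with
  | zero =>
    intro fuel p _ hfix
    simp only [Function.iterate_zero, id_eq] at hfix ⊢
    exact findSinkA_stuck grid p hfix fuel
  | succ m ih =>
    intro fuel p hle hfix
    by_cases hm : is_belt grid p.1 p.2 = true ∧ is_belt grid (mv grid p).1 (mv grid p).2 = true
    · have hstep : stepF grid p = mv grid p := stepF_eq_mv grid p hm.1 hm.2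
      cases fuel with
      | zero => omega
      | succ f =>
        have hred : findSinkA grid (f + 1) p.1 p.2 = findSinkA grid f (mv grid p).1 (mv grid p).2 := by
          simp only [findSinkA, hm.1, if_true]
          rw [if_pos (by simpa [mv] using hm.2)]
          simp [mv]
        rw [hred]
        rw [Function.iterate_succ_apply, hstep] at hfix ⊢
        exact ih f (mv grid p) (by omega) hfix
    · have hstep : stepF grid p = p := stepF_eq_self grid p hm
      rw [Function.iterate_fixed hstep] at hfix ⊢
      exact findSinkA_stuck grid p hstep fuel

lemma stuck_of_fix (grid : List String) (p : Int × Int) (n : Nat)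
    (h : stepF grid ((stepF grid)^[n] p) = (stepF grid)^[n] p) (hn : n ≤ cellCount grid) :
    Stuck grid p ∧ sinkOf grid p = (stepF grid)^[n] p := by
  have he : (stepF grid)^[cellCount grid] p = (stepF grid)^[n] p := iter_fix_ge _ p n _ h hn
  refine ⟨?_, he⟩
  unfold Stuck sinkOf
  rw [he]
  exact h

lemma stuck_mv (grid : List String) (p : Int × Int)
    (hb : is_belt grid p.1 p.2 = true) (hb2 : is_belt grid (mv grid p).1 (mv grid p).2 = true)
    (h : Stuck grid p) : Stuck grid (mv grid p) ∧ sinkOf grid (mv grid p) = sinkOf grid p := by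
  have hstep : stepF grid p = mv grid p := stepF_eq_mv grid p hb hb2
  have hsink : sinkOf grid (mv grid p) = sinkOf grid p := by
    unfold sinkOf
    rw [← hstep, ← Function.iterate_succ_apply, Function.iterate_succ_apply']
    exact h
  refine ⟨?_, hsink⟩
  unfold Stuck
  rw [hsink]
  exact h

lemma sinkOf_of_fix0 (grid : List String) (p : Int × Int) (h : stepF grid p = p) :
    sinkOf grid p = p := Function.iterate_fixed h (cellCount grid)


lemma memoOK_insert (grid : List String) (memo : PySem.Dict (Int × Int) (Int × Int))
    (q s : Int × Int) (hm : MemoOK grid memo) (hq : Stuck grid q) (hs : s = sinkOf grid q) :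
    MemoOK grid (memo.insert q s) := by
  intro k v hv
  rw [PySem.Dict.get?_insert] at hv
  split_ifs at hv with hk
  · cases hv
    exact hk ▸ ⟨hq, hs⟩
  · exact hm k v hv

lemma sinkLoop_spec (grid : List String) :
    ∀ (n fuel : Nat) (p : Int × Int) (st : List (Int × Int))
      (memo : PySem.Dict (Int × Int) (Int × Int)),
      MemoOK grid memo → n < fuel → n ≤ cellCount grid →
      is_belt grid p.1 p.2 = true →
      stepF grid ((stepF grid)^[n] p) = (stepF grid)^[n] p →
      (∀ q ∈ st, Stuck grid q ∧ sinkOf grid q = sinkOf grid p) →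
      MemoOK grid (sinkLoop grid fuel p st memo).2.2 ∧
      (sinkLoop grid fuel p st memo).2.2.get? (sinkLoop grid fuel p st memo).1 =
        some (sinkOf grid p) ∧
      (∀ q ∈ (sinkLoop grid fuel p st memo).2.1,
        Stuck grid q ∧ sinkOf grid q = sinkOf grid p) := by
  intro n
  induction n with
  | zero =>
    intro fuel p st memo hmOK hfuel _ hb hfix hst
    simp only [Function.iterate_zero, id_eq] at hfix
    obtain ⟨f, rfl⟩ : ∃ f, fuel = f + 1 := ⟨fuel - 1, by omega⟩
    by_cases hmem : (memo.get? p).isSome = true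
    · obtain ⟨v, hv⟩ := Option.isSome_iff_exists.mp hmem
      have := hmOK p v hv
      simp only [sinkLoop, hmem, if_true]
      exact ⟨hmOK, by rw [hv, this.2, sinkOf_of_fix0 grid p hfix], hst⟩
    · by_cases hb2 : is_belt grid (mv grid p).1 (mv grid p).2 = true
      · exact absurd (hfix ▸ stepF_eq_mv grid p hb hb2).symm (mv_ne grid p hb)
      · have hsp : sinkOf grid p = p := sinkOf_of_fix0 grid p hfix
        simp only [sinkLoop, hmem, if_false, Bool.false_eq_true, hb2]
        refine ⟨memoOK_insert grid memo p p hmOK (by unfold Stuck; rw [hsp]; exact hfix) hsp.symm,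
          ?_, hst⟩
        rw [PySem.Dict.get?_insert_self, hsp]
  | succ m ih =>
    intro fuel p st memo hmOK hfuel hN hb hfix hst
    obtain ⟨f, rfl⟩ : ∃ f, fuel = f + 1 := ⟨fuel - 1, by omega⟩
    by_cases hmem : (memo.get? p).isSome = true
    · obtain ⟨v, hv⟩ := Option.isSome_iff_exists.mp hmem
      have := hmOK p v hv
      simp only [sinkLoop, hmem, if_true]
      exact ⟨hmOK, by rw [hv, this.2], hst⟩
    · by_cases hb2 : is_belt grid (mv grid p).1 (mv grid p).2 = true
      · have hstep : stepF grid p = mv grid p := stepF_eq_mv grid p hb hb2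
        have hfix' : stepF grid ((stepF grid)^[m] (mv grid p)) = (stepF grid)^[m] (mv grid p) := by
          rw [← hstep, ← Function.iterate_succ_apply]; exact hfix
        have hstuckp : Stuck grid p ∧ sinkOf grid p = (stepF grid)^[m+1] p :=
          stuck_of_fix grid p (m + 1) hfix (by omega)
        have hmvsink : sinkOf grid (mv grid p) = sinkOf grid p :=
          (stuck_mv grid p hb hb2 hstuckp.1).2
        have hred : sinkLoop grid (f + 1) p st memo =
            sinkLoop grid f (mv grid p) (st ++ [p]) memo := by
          simp only [sinkLoop, hmem, if_false, Bool.false_eq_true, hb2, if_true]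
        rw [hred]
        have hst' : ∀ q ∈ st ++ [p], Stuck grid q ∧ sinkOf grid q = sinkOf grid (mv grid p) := by
          intro q hq
          rw [hmvsink]
          rcases List.mem_append.mp hq with h | h
          · exact hst q h
          · rw [List.mem_singleton.mp h]
            exact ⟨hstuckp.1, rfl⟩
        have := ih f (mv grid p) (st ++ [p]) memo hmOK (by omega) (by omega) hb2 hfix' hst'
        rw [hmvsink] at this
        exact this
      · have hstep : stepF grid p = p := stepF_eq_self grid p (by tauto)
        have hsp : sinkOf grid p = p := sinkOf_of_fix0 grid p hstep
        simp only [sinkLoop, hmem, if_false, Bool.false_eq_true, hb2]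
        refine ⟨memoOK_insert grid memo p p hmOK (by unfold Stuck; rw [hsp]; exact hstep) hsp.symm,
          ?_, hst⟩
        rw [PySem.Dict.get?_insert_self, hsp]

lemma memoOK_writeback (grid : List String) (s : Int × Int) :
    ∀ (st : List (Int × Int)) (memo : PySem.Dict (Int × Int) (Int × Int)),
      MemoOK grid memo → (∀ q ∈ st, Stuck grid q ∧ s = sinkOf grid q) →
      MemoOK grid (st.foldl (fun m q => m.insert q s) memo) := by
  intro st
  induction st with
  | nil => intro memo h _; exact h
  | cons q st ih =>
    intro memo hmOK hst
    simp only [List.foldl_cons]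
    exact ih _ (memoOK_insert grid memo q s hmOK (hst q (by simp)).1 (hst q (by simp)).2)
      (fun q' hq' => hst q' (by simp [hq']))

lemma sinkB_spec (grid : List String) (p : Int × Int)
    (memo : PySem.Dict (Int × Int) (Int × Int))
    (hmOK : MemoOK grid memo) (hb : is_belt grid p.1 p.2 = true) (hstuck : Stuck grid p) :
    (sinkB grid p memo).1 = sinkOf grid p ∧ MemoOK grid (sinkB grid p memo).2 := by
  have H := sinkLoop_spec grid (cellCount grid) (cellCount grid + 1) p [] memo hmOK
    (by omega) le_rfl hb hstuck (by simp)
  unfold sinkB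
  have hgetD : (sinkLoop grid (cellCount grid + 1) p [] memo).2.2.getD
      (sinkLoop grid (cellCount grid + 1) p [] memo).1 (0, 0) = sinkOf grid p := by
    rw [PySem.Dict.getD_eq_get?_getD, H.2.1]
    rfl
  refine ⟨hgetD, ?_⟩
  exact memoOK_writeback grid _ _ _ H.1
    (fun q hq => ⟨(H.2.2 q hq).1, by rw [hgetD, (H.2.2 q hq).2]⟩)


-- the three per-cell loop bodies (defeq to the ports' inline lambdas) and the two source tests
def condA (grid : List String) (p : Int × Int) : Bool :=
  (dirOf (charAt grid p.1 p.2)).isSome && !(hasIncoming grid p.1 p.2)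

def condB (grid : List String) (p : Int × Int) : Bool :=
  (dirOf (charAt grid p.1 p.2)).isSome && !(PySem.Set.contains (hasInSet grid) p)

def gA (grid : List String) (acc : List (Int × Int)) (p : Int × Int) : List (Int × Int) :=
  if (dirOf (charAt grid p.1 p.2)).isSome then
    if hasIncoming grid p.1 p.2 then acc else acc ++ [p]
  else acc

def gS (grid : List String) (st : PySem.Set (Int × Int)) (p : Int × Int) : PySem.Set (Int × Int) :=
  if (dirOf (charAt grid p.1 p.2)).isSome then
    (if is_belt grid (mv grid p).1 (mv grid p).2 then PySem.Set.add st (mv grid p) else st)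
  else st

def gB (grid : List String)
    (st : List ((Int × Int) × (Int × Int)) × PySem.Dict (Int × Int) (Int × Int))
    (p : Int × Int) : List ((Int × Int) × (Int × Int)) × PySem.Dict (Int × Int) (Int × Int) :=
  if condB grid p then (st.1 ++ [(p, (sinkB grid p st.2).1)], (sinkB grid p st.2).2) else st

lemma foldl_cells {σ : Type} (grid : List String) (g : σ → (Int × Int) → σ) (init : σ) :
    (List.range grid.length).foldl (fun s rn =>
      (List.range (rowLen grid rn)).foldl (fun s cn => g s ((rn : Int), (cn : Int))) s) init =
    (cells grid).foldl g init := by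
  simp only [cells, List.foldl_flatMap, List.foldl_map]

lemma foldl_if_if {α : Type} (l : List α) (c1 c2 : α → Bool) (acc : List α) :
    l.foldl (fun acc x => if c1 x then (if c2 x then acc else acc ++ [x]) else acc) acc =
    acc ++ l.filter (fun x => c1 x && !c2 x) := by
  have h := PySem.List.foldl_congr_mem l
    (fun acc x => if c1 x then (if c2 x then acc else acc ++ [x]) else acc)
    (fun acc x => if (c1 x && !c2 x) then acc ++ [x] else acc) acc
    (by intro acc x _; by_cases h1 : c1 x <;> by_cases h2 : c2 x <;> simp [h1, h2])
  rw [h]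
  exact PySem.List.foldl_append_if_eq_filter _ _ _

lemma foldl_gA (grid : List String) (acc : List (Int × Int)) :
    (cells grid).foldl (gA grid) acc = acc ++ (cells grid).filter (condA grid) :=
  foldl_if_if (cells grid) (fun p => (dirOf (charAt grid p.1 p.2)).isSome)
    (fun p => hasIncoming grid p.1 p.2) acc

lemma A_as_filter (grid : List String) : get_source_sink grid =
    ((cells grid).filter (condA grid)).map
      (fun p => (p, findSinkA grid (cellCount grid + 1) p.1 p.2)) := by
  have h0 : get_source_sink grid = ((cells grid).foldl (gA grid) []).foldl
      (fun acc s => acc ++ [(s, findSinkA grid (cellCount grid + 1) s.1 s.2)]) [] := by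
    rw [← foldl_cells grid (gA grid) ([] : List (Int × Int))]
    rfl
  rw [h0, foldl_gA, List.nil_append, PySem.List.foldl_append_singleton_eq_map, List.nil_append]

lemma hasInSet_as_fold (grid : List String) :
    hasInSet grid = (cells grid).foldl (gS grid) PySem.Set.empty := by
  rw [← foldl_cells grid (gS grid) PySem.Set.empty]
  rfl

lemma B_as_fold (grid : List String) : get_source_sink_alt grid =
    ((cells grid).foldl (gB grid)
      (([] : List ((Int × Int) × (Int × Int))),
        (PySem.Dict.empty : PySem.Dict (Int × Int) (Int × Int)))).1 := by
  rw [← foldl_cells grid (gB grid) _]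
  rfl

lemma mem_foldl_add_if {β : Type} (l : List β) (c1 c2 : β → Bool) (f : β → Int × Int) :
    ∀ (s : PySem.Set (Int × Int)) (x : Int × Int),
      (x ∈ l.foldl (fun s b =>
        if c1 b then (if c2 b then PySem.Set.add s (f b) else s) else s) s) ↔
      x ∈ s ∨ ∃ b ∈ l, c1 b = true ∧ c2 b = true ∧ f b = x := by
  induction l with
  | nil => simp
  | cons b l ih =>
    intro s x
    simp only [List.foldl_cons, List.mem_cons]
    by_cases h1 : c1 b <;> by_cases h2 : c2 b <;>
      simp [h1, h2, ih, PySem.Set.mem_add] <;> tauto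


lemma mem_cells (grid : List String) (x : Int × Int) :
    x ∈ cells grid ↔ ∃ rn : Nat, rn < grid.length ∧ ∃ cn : Nat, cn < rowLen grid rn ∧
      x = ((rn : Int), (cn : Int)) := by
  simp [cells, List.mem_flatMap, List.mem_map, List.mem_range]
  constructor
  · rintro ⟨rn, hrn, cn, hcn, h⟩
    exact ⟨rn, hrn, cn, hcn, h.symm⟩
  · rintro ⟨rn, hrn, cn, hcn, h⟩
    exact ⟨rn, hrn, cn, hcn, h.symm⟩

lemma belt_mem_cells (grid : List String) (p : Int × Int)
    (h : is_belt grid p.1 p.2 = true) : p ∈ cells grid := by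
  simp only [is_belt, Bool.and_eq_true, decide_eq_true_eq] at h
  obtain ⟨⟨⟨⟨h1, h2⟩, h3⟩, h4⟩, _⟩ := h
  rw [mem_cells]
  refine ⟨p.1.toNat, by omega, p.2.toNat, by omega, ?_⟩
  rw [Int.toNat_of_nonneg h1, Int.toNat_of_nonneg h3]

lemma cells_belt_iff (grid : List String) (p : Int × Int) (hp : p ∈ cells grid) :
    (dirOf (charAt grid p.1 p.2)).isSome = true ↔ is_belt grid p.1 p.2 = true := by
  obtain ⟨rn, hrn, cn, hcn, rfl⟩ := (mem_cells grid p).mp hp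
  simp only [is_belt, Bool.and_eq_true, decide_eq_true_eq]
  constructor
  · intro h
    refine ⟨⟨⟨⟨by positivity, by exact_mod_cast hrn⟩, by positivity⟩, ?_⟩, h⟩
    · simp only [Int.toNat_natCast]
      exact_mod_cast hcn
  · exact fun h => h.2

lemma incoming_witness (grid : List String) (a b dr dc : Int)
    (hbp : is_belt grid a b = true)
    (hb : is_belt grid (a + dr) (b + dc) = true)
    (hd : dirD (charAt grid (a + dr) (b + dc)) = (-dr, -dc)) :
    ∃ q : Int × Int, is_belt grid q.1 q.2 = true ∧
      is_belt grid (mv grid q).1 (mv grid q).2 = true ∧ mv grid q = (a, b) := by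
  have hmv : mv grid (a + dr, b + dc) = (a, b) := by
    simp only [mv, hd]
    simp only [Prod.mk.injEq]
    constructor <;> ring
  exact ⟨(a + dr, b + dc), hb, by rw [hmv]; exact hbp, hmv⟩

lemma hasIncoming_iff (grid : List String) (p : Int × Int)
    (hbp : is_belt grid p.1 p.2 = true) :
    hasIncoming grid p.1 p.2 = true ↔ ∃ q : Int × Int, is_belt grid q.1 q.2 = true ∧
      is_belt grid (mv grid q).1 (mv grid q).2 = true ∧ mv grid q = p := by
  constructor
  · intro h
    obtain ⟨a, b⟩ := p
    simp only [hasIncoming, revDirsList, List.any_cons, List.any_nil, Bool.or_false,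
      Bool.or_eq_true, Bool.and_eq_true, decide_eq_true_eq] at h
    rcases h with ⟨⟨hb, _⟩, hd⟩ | ⟨⟨hb, _⟩, hd⟩ | ⟨⟨hb, _⟩, hd⟩ | ⟨⟨hb, _⟩, hd⟩
    · exact incoming_witness grid a b 0 (-1) hbp hb hd
    · exact incoming_witness grid a b 0 1 hbp hb hd
    · exact incoming_witness grid a b 1 0 hbp hb hd
    · exact incoming_witness grid a b (-1) 0 hbp hb hd
  · rintro ⟨q, hq, _, hmv⟩
    have hiso := belt_isSome grid q.1 q.2 hq
    simp only [hasIncoming, revDirsList, List.any_cons, List.any_nil, Bool.or_false,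
      Bool.or_eq_true, Bool.and_eq_true, decide_eq_true_eq]
    rcases dirD_cases _ hiso with hd | hd | hd | hd
    · have e1 : q.1 + (0 : Int) = p.1 := by rw [← hmv]; simp [mv, hd]
      have e2 : q.2 + (1 : Int) = p.2 := by rw [← hmv]; simp [mv, hd]
      have f1 : p.1 + (0 : Int) = q.1 := by omega
      have f2 : p.2 + (-1 : Int) = q.2 := by omega
      refine Or.inl ⟨⟨?_, ?_⟩, ?_⟩
      · rw [f1, f2]; exact hq
      · rw [f1, f2]; exact hiso
      · rw [f1, f2, hd]; simp
    · have e1 : q.1 + (0 : Int) = p.1 := by rw [← hmv]; simp [mv, hd]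
      have e2 : q.2 + (-1 : Int) = p.2 := by rw [← hmv]; simp [mv, hd]
      have f1 : p.1 + (0 : Int) = q.1 := by omega
      have f2 : p.2 + (1 : Int) = q.2 := by omega
      refine Or.inr (Or.inl ⟨⟨?_, ?_⟩, ?_⟩)
      · rw [f1, f2]; exact hq
      · rw [f1, f2]; exact hiso
      · rw [f1, f2, hd]; simp
    · have e1 : q.1 + (-1 : Int) = p.1 := by rw [← hmv]; simp [mv, hd]
      have e2 : q.2 + (0 : Int) = p.2 := by rw [← hmv]; simp [mv, hd]
      have f1 : p.1 + (1 : Int) = q.1 := by omega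
      have f2 : p.2 + (0 : Int) = q.2 := by omega
      refine Or.inr (Or.inr (Or.inl ⟨⟨?_, ?_⟩, ?_⟩))
      · rw [f1, f2]; exact hq
      · rw [f1, f2]; exact hiso
      · rw [f1, f2, hd]; simp
    · have e1 : q.1 + (1 : Int) = p.1 := by rw [← hmv]; simp [mv, hd]
      have e2 : q.2 + (0 : Int) = p.2 := by rw [← hmv]; simp [mv, hd]
      have f1 : p.1 + (-1 : Int) = q.1 := by omega
      have f2 : p.2 + (0 : Int) = q.2 := by omega
      refine Or.inr (Or.inr (Or.inr ⟨⟨?_, ?_⟩, ?_⟩))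
      · rw [f1, f2]; exact hq
      · rw [f1, f2]; exact hiso
      · rw [f1, f2, hd]; simp

lemma mem_hasInSet (grid : List String) (x : Int × Int) :
    x ∈ hasInSet grid ↔ ∃ q : Int × Int, is_belt grid q.1 q.2 = true ∧
      is_belt grid (mv grid q).1 (mv grid q).2 = true ∧ mv grid q = x := by
  rw [hasInSet_as_fold]
  rw [show (cells grid).foldl (gS grid) PySem.Set.empty =
    (cells grid).foldl (fun s b => if (dirOf (charAt grid b.1 b.2)).isSome then
      (if is_belt grid (mv grid b).1 (mv grid b).2 then PySem.Set.add s (mv grid b) else s)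
      else s) PySem.Set.empty from rfl]
  rw [mem_foldl_add_if (cells grid) _ _ (fun b => mv grid b) PySem.Set.empty x]
  simp only [PySem.Set.empty]
  constructor
  · rintro (h | ⟨q, hq, h1, h2, h3⟩)
    · simp at h
    · exact ⟨q, (cells_belt_iff grid q hq).mp h1, h2, h3⟩
  · rintro ⟨q, hq, h2, h3⟩
    exact Or.inr ⟨q, belt_mem_cells grid q hq,
      (cells_belt_iff grid q (belt_mem_cells grid q hq)).mpr hq, h2, h3⟩

lemma cond_eq (grid : List String) (p : Int × Int) (hp : p ∈ cells grid) :
    condA grid p = condB grid p := by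
  unfold condA condB
  by_cases hs : (dirOf (charAt grid p.1 p.2)).isSome = true
  · have hbp : is_belt grid p.1 p.2 = true := (cells_belt_iff grid p hp).mp hs
    simp only [hs, Bool.true_and]
    have : hasIncoming grid p.1 p.2 = PySem.Set.contains (hasInSet grid) p := by
      cases h2 : PySem.Set.contains (hasInSet grid) p with
      | false =>
        cases h : hasIncoming grid p.1 p.2 with
        | false => rfl
        | true =>
          exact absurd ((PySem.Set.contains_iff _ _).mpr
            ((mem_hasInSet grid p).mpr ((hasIncoming_iff grid p hbp).mp h)))
            (by rw [h2]; simp)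
      | true =>
        exact (hasIncoming_iff grid p hbp).mpr
          ((mem_hasInSet grid p).mp ((PySem.Set.contains_iff _ _).mp h2))
    rw [this]
  · simp only [Bool.not_eq_true] at hs
    simp [hs]


lemma B_fold (grid : List String) :
    ∀ (l : List (Int × Int)) (acc : List ((Int × Int) × (Int × Int)))
      (memo : PySem.Dict (Int × Int) (Int × Int)),
      MemoOK grid memo →
      (∀ p ∈ l, condB grid p = true → is_belt grid p.1 p.2 = true ∧ Stuck grid p) →
      (l.foldl (gB grid) (acc, memo)).1 =
        acc ++ (l.filter (condB grid)).map (fun p => (p, sinkOf grid p)) := by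
  intro l
  induction l with
  | nil => intro acc memo _ _; simp
  | cons p l ih =>
    intro acc memo hmOK hl
    by_cases hc : condB grid p = true
    · have hps := hl p (by simp) hc
      have hsb := sinkB_spec grid p memo hmOK hps.1 hps.2
      simp only [List.foldl_cons, gB, hc, if_true]
      rw [ih (acc ++ [(p, (sinkB grid p memo).1)]) (sinkB grid p memo).2 hsb.2
        (fun q hq hcq => hl q (by simp [hq]) hcq)]
      rw [hsb.1]
      simp [hc]
    · simp only [List.foldl_cons, gB, hc, if_false, Bool.false_eq_true]
      rw [ih acc memo hmOK (fun q hq hcq => hl q (by simp [hq]) hcq)]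
      simp [hc]

lemma source_stuck (grid : List String) (hpre : Pre_get_source_sink grid)
    (p : Int × Int) (hp : p ∈ cells grid) (hc : condB grid p = true) :
    is_belt grid p.1 p.2 = true ∧ Stuck grid p := by
  rw [← cond_eq grid p hp] at hc
  unfold condA at hc
  simp only [Bool.and_eq_true, Bool.not_eq_true'] at hc
  have hb := (cells_belt_iff grid p hp).mp hc.1
  have hfix := hpre p hp hb hc.2
  exact ⟨hb, (stuck_of_fix grid p (cellCount grid) hfix le_rfl).1⟩

-- ===== VERDICT (by name: the statement is the Claim_ definition above) =====
theorem get_source_sink_spec : Claim_equal_get_source_sink := by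
  intro grid _ hpre
  unfold Spec_get_source_sink
  rw [A_as_filter, B_as_fold]
  rw [B_fold grid (cells grid) [] PySem.Dict.empty
    (fun k v h => absurd h (by simp [PySem.Dict.get?_empty]))
    (fun p hp hc => source_stuck grid hpre p hp hc)]
  rw [List.nil_append]
  rw [List.filter_congr (fun p hp => cond_eq grid p hp)]
  apply List.map_congr_left
  intro p hp
  have hmem := List.mem_filter.mp hp
  have hsrc := source_stuck grid hpre p hmem.1 hmem.2
  have hfs := findSinkA_eq grid (cellCount grid) (cellCount grid + 1) p (by omega) hsrc.2
  rw [hfs]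
  rfl
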